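-- pv_equiv track=rewrite | github.com/sajjadium/ctf-archives | ctfs/Sekai/2022/crypto/EZmaze/chall.py | toPath
-- ===== SOURCE A (Python) =====
-- directions = "LRUD"
--
-- def toPath(x: int):
-- 	s = bin(x)[2:]
-- 	if len(s) % 2 == 1:
-- 		s = "0" + s
--
-- 	path = ""
-- 	for i in range(0, len(s), 2):
-- 		path += directions[int(s[i:i+2], 2)]
-- 	return path
-- ===== SOURCE B (Python) =====
-- directions = "LRUD"
--
-- def toPath(x: int):
--     if x < 0:
--         raise ValueError("negative value has no path")
--     path = ""
--     while True:
--         path = directions[x % 4] + path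
--         x //= 4
--         if x == 0:
--             break
--     return path
-- ===== Notes on version B (the rewrite author's own statement) =====
-- stated objective: simpler
-- what changed: Replaced the bin()-string detour (binary string, parity padding, two-character slices reparsed with int(...,2)) by direct base-4 arithmetic: a do-while loop that prepends directions[x % 4] and divides x by 4, with an explicit ValueError guard for negatives matching A's ValueError on bin-string parsing.
import Mathlib
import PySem

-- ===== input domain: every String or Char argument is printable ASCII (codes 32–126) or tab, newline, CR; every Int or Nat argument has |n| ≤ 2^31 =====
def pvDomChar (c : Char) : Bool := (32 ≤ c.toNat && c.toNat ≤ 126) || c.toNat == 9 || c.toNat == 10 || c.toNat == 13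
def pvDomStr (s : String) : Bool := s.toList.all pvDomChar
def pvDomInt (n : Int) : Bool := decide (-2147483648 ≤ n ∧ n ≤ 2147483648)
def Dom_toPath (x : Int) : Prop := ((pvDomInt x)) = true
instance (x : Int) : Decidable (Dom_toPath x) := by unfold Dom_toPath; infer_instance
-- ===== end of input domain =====

-- B replaces A's binary-string build/pad/slice-and-reparse by a do-while base-4 arithmetic loop (objective: simpler).

-- ===== PORT A =====
-- bin(n)[2:] for n > 0, as a list of '0'/'1' chars (big-endian)
def pvBits (n : Nat) : List Char :=
  if n = 0 then [] else pvBits (n / 2) ++ [if n % 2 = 1 then '1' else '0']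

def pvBitVal (c : Char) : Nat := if c = '1' then 1 else 0

-- directions[int(s[i:i+2], 2)] for the two-char slice a,b (index is 0..3, so getD is exact)
def pvDirOf (a b : Char) : Char := ['L','R','U','D'].getD (2 * pvBitVal a + pvBitVal b) 'L'

-- the for-loop over range(0, len(s), 2): consume two chars per step (s always has even length)
def pvPairs : List Char → List Char
  | a :: b :: rest => pvDirOf a b :: pvPairs rest
  | _ => []

def toPath (x : Int) : String :=
  let s := if x.toNat = 0 then ['0'] else pvBits x.toNat   -- bin(x)[2:] (x ≥ 0 under Pre_)
  let s := if s.length % 2 = 1 then '0' :: s else s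
  String.mk (pvPairs s)

-- ===== PORT B =====
-- the do-while loop of Source B: prepend directions[x % 4], x //= 4, stop when x == 0
def pvAltLoop (x : Nat) (path : List Char) : List Char :=
  let path' := (['L','R','U','D'].getD (x % 4) 'L') :: path
  if _h : x / 4 = 0 then path' else pvAltLoop (x / 4) path'
termination_by x
decreasing_by omega

def toPath_alt (x : Int) : String :=
  if x < 0 then "" else String.mk (pvAltLoop x.toNat [])   -- Source B raises ValueError for x < 0 (outside Pre_)

-- ===== PRECONDITION & SPEC =====
-- Pre_: both A and B raise ValueError on negative x (A: int('b..',2) on bin(-n); B: explicit guard)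
def Pre_toPath (x : Int) : Prop := 0 ≤ x
instance (x : Int) : Decidable (Pre_toPath x) := by unfold Pre_toPath; infer_instance
def pvWitness_toPath : Int := (6)

def Spec_toPath (x : Int) (out : String) : Prop := out = toPath_alt x
instance (x : Int) (out : String) : Decidable (Spec_toPath x out) := by unfold Spec_toPath; infer_instance

-- ===== CLAIM (what is proved, stated in full; the proofs are below) =====
def Claim_equal_toPath : Prop := ∀ (x : Int), Dom_toPath x → Pre_toPath x → Spec_toPath x (toPath x)

-- ===== LEMMAS AND PROOFS =====

def pvPad (l : List Char) : List Char := if l.length % 2 = 1 then '0' :: l else l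

theorem pvPad_append (l : List Char) (a b : Char) :
    pvPad (l ++ [a, b]) = pvPad l ++ [a, b] := by
  unfold pvPad
  have h2 : (l ++ [a, b]).length % 2 = l.length % 2 := by simp [Nat.add_mod]
  rw [h2]
  split_ifs <;> rfl

theorem pvPad_even (l : List Char) : (pvPad l).length % 2 = 0 := by
  unfold pvPad
  split_ifs with h
  · simp; omega
  · omega

theorem pvPairs_append (l : List Char) (a b : Char) (h : l.length % 2 = 0) :
    pvPairs (l ++ [a, b]) = pvPairs l ++ [pvDirOf a b] := by
  match l with
  | [] => simp [pvPairs]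
  | [c] => simp at h
  | x :: y :: rest =>
      have h' : rest.length % 2 = 0 := by simp at h; omega
      simp only [List.cons_append, pvPairs]
      rw [pvPairs_append rest a b h']

theorem pvAltLoop_append (x : Nat) : ∀ p : List Char, pvAltLoop x p = pvAltLoop x [] ++ p := by
  induction x using Nat.strong_induction_on with
  | _ x ih =>
    intro p
    by_cases h : x / 4 = 0
    · conv_lhs => rw [pvAltLoop]
      conv_rhs => rw [pvAltLoop]
      rw [dif_pos h, dif_pos h]
      rfl
    · conv_lhs => rw [pvAltLoop]
      conv_rhs => rw [pvAltLoop]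
      rw [dif_neg h, dif_neg h,
          ih (x / 4) (by omega) ((['L','R','U','D'].getD (x % 4) 'L') :: p),
          ih (x / 4) (by omega) ([(['L','R','U','D'].getD (x % 4) 'L')])]
      simp

theorem pvBits_step (n : Nat) (h : 4 ≤ n) :
    pvBits n = pvBits (n / 4) ++
      [if (n / 2) % 2 = 1 then '1' else '0', if n % 2 = 1 then '1' else '0'] := by
  rw [pvBits, pvBits]
  have h2 : ¬ n = 0 := by omega
  have h3 : ¬ n / 2 = 0 := by omega
  simp [h2, h3, Nat.div_div_eq_div_mul]

theorem pvDirOf_bits (n : Nat) :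
    pvDirOf (if (n / 2) % 2 = 1 then '1' else '0') (if n % 2 = 1 then '1' else '0')
      = ['L','R','U','D'].getD (n % 4) 'L' := by
  have e1 : n % 2 = (n % 4) % 2 := by omega
  have e2 : (n / 2) % 2 = (n % 4) / 2 := by omega
  rw [e1, e2]
  have h4 : n % 4 < 4 := by omega
  set m := n % 4 with hm
  clear_value m
  interval_cases m <;> decide

theorem pvBits_one : pvBits 1 = ['1'] := by
  rw [pvBits]; norm_num; rw [pvBits]; norm_num

theorem pvBits_two : pvBits 2 = ['1', '0'] := by
  rw [pvBits]; norm_num; rw [pvBits]; norm_num; rw [pvBits]; norm_num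

theorem pvBits_three : pvBits 3 = ['1', '1'] := by
  rw [pvBits]; norm_num; rw [pvBits]; norm_num; rw [pvBits]; norm_num

theorem pvMain (n : Nat) :
    pvPairs (pvPad (if n = 0 then ['0'] else pvBits n)) = pvAltLoop n [] := by
  by_cases h0 : n = 0
  · subst h0
    rw [pvAltLoop, dif_pos (by norm_num)]
    decide
  · by_cases h4 : n < 4
    · rcases (by omega : n = 1 ∨ n = 2 ∨ n = 3) with h | h | h <;> subst h
      · rw [pvBits_one, pvAltLoop, dif_pos (by norm_num)]; decide
      · rw [pvBits_two, pvAltLoop, dif_pos (by norm_num)]; decide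
      · rw [pvBits_three, pvAltLoop, dif_pos (by norm_num)]; decide
    · have hd : ¬ n / 4 = 0 := by omega
      rw [if_neg h0, pvBits_step n (by omega), pvPad_append,
          pvPairs_append _ _ _ (pvPad_even _), pvDirOf_bits]
      have ih := pvMain (n / 4)
      rw [if_neg hd] at ih
      rw [ih]
      conv_rhs => rw [pvAltLoop]
      rw [dif_neg hd,
          pvAltLoop_append (n / 4) ([(['L','R','U','D'].getD (n % 4) 'L')])]
termination_by n
decreasing_by omega

-- ===== VERDICT (by name: the statement is the Claim_ definition above) =====
theorem toPath_spec : Claim_equal_toPath := by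
  intro x _ hpre
  unfold Pre_toPath at hpre
  unfold Spec_toPath toPath toPath_alt
  rw [if_neg (by omega : ¬ x < 0)]
  exact congrArg String.mk (pvMain x.toNat)
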